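-- pv_equiv track=rewrite | github.com/iBakuman/nikke-data-collector | src/extractor/character_extractor.py | calculate_character_positions
-- ===== SOURCE A (Python) =====
-- from typing import Dict, List, Tuple
--
-- def calculate_character_positions(
--         boundary_width: int,
--         character_width: int,
--         character_spacing: int,
--         character_count: int = 12
-- ) -> List[Tuple[int, int]]:
--     """
--     Calculate the x-coordinates (start, end) for each character in the image.
--
--     Args:
--         boundary_width: Width of the boundary on each side
--         character_width: Width of each character
--         character_spacing: Spacing between characters
--         character_count: Number of characters to extract
--
--     Returns:
--         List of (start_x, end_x) tuples for each character
--     """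
--     positions = []
--     current_x = boundary_width
--
--     for i in range(character_count):
--         start_x = current_x
--         end_x = start_x + character_width
--         positions.append((start_x, end_x))
--         current_x = end_x + character_spacing
--
--     return positions
-- ===== SOURCE B (Python) =====
-- def calculate_character_positions(
--         boundary_width: int,
--         character_width: int,
--         character_spacing: int,
--         character_count: int = 12
-- ):
--     step = character_width + character_spacing
--     return [
--         (boundary_width + i * step, boundary_width + i * step + character_width)
--         for i in range(character_count)
--     ]
-- ===== Notes on version B (the rewrite author's own statement) =====
-- stated objective: simpler
-- what changed: Replaced the running current_x accumulator loop with a closed-form per-index computation (start = boundary + i*(width+spacing)) emitted by a comprehension.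
import Mathlib
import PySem

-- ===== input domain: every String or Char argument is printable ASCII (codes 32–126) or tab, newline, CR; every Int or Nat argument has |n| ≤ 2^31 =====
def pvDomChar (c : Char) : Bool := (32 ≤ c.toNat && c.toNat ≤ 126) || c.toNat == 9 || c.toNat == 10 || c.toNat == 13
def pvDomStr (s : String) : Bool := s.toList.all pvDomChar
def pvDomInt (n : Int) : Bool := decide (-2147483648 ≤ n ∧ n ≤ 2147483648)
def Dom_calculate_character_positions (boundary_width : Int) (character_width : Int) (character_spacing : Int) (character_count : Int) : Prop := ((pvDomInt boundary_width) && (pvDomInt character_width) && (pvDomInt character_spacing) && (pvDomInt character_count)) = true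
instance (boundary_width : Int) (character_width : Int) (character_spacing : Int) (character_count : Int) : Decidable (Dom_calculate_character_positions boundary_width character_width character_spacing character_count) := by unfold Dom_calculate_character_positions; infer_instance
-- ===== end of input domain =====

-- B replaces A's running current_x accumulator with a closed-form per-index formula (simpler decomposition, same O(n) cost).

-- ===== PORT A =====
-- A: loop over range(character_count) carrying (positions, current_x); append (start, start+width), advance by width+spacing.
def calculate_character_positions (boundary_width : Int) (character_width : Int) (character_spacing : Int) (character_count : Int) : List (Int × Int) :=
  let init : List (Int × Int) × Int := ([], boundary_width)
  let final := (PySem.List.pyRange 0 character_count 1).foldl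
    (fun (st : List (Int × Int) × Int) _i =>
      let start_x := st.2
      let end_x := start_x + character_width
      (st.1 ++ [(start_x, end_x)], end_x + character_spacing)) init
  final.1

-- ===== PORT B =====
-- B: closed form per index i: start = boundary + i*step, end = start + width.
def calculate_character_positions_alt (boundary_width : Int) (character_width : Int) (character_spacing : Int) (character_count : Int) : List (Int × Int) :=
  let step := character_width + character_spacing
  (PySem.List.pyRange 0 character_count 1).map
    (fun i => (boundary_width + i * step, boundary_width + i * step + character_width))

-- ===== PRECONDITION & SPEC =====
def Spec_calculate_character_positions (boundary_width : Int) (character_width : Int) (character_spacing : Int) (character_count : Int) (out : List (Int × Int)) : Prop := out = calculate_character_positions_alt boundary_width character_width character_spacing character_count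
instance (boundary_width : Int) (character_width : Int) (character_spacing : Int) (character_count : Int) (out : List (Int × Int)) : Decidable (Spec_calculate_character_positions boundary_width character_width character_spacing character_count out) := by unfold Spec_calculate_character_positions; infer_instance

-- ===== CLAIM (what is proved, stated in full; the proofs are below) =====
def Claim_equal_calculate_character_positions : Prop := ∀ (boundary_width : Int) (character_width : Int) (character_spacing : Int) (character_count : Int), Dom_calculate_character_positions boundary_width character_width character_spacing character_count → Spec_calculate_character_positions boundary_width character_width character_spacing character_count (calculate_character_positions boundary_width character_width character_spacing character_count)

-- ===== LEMMAS AND PROOFS =====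

-- Loop invariant over range(0, n): accumulator = closed-form list, current_x = b + n*step.
theorem ccp_fold_invariant (b w s : Int) (n : Nat) :
    (PySem.List.pyRange 0 n 1).foldl
      (fun (st : List (Int × Int) × Int) (_i : Int) =>
        (st.1 ++ [(st.2, st.2 + w)], st.2 + w + s)) ([], b)
    = ((PySem.List.pyRange 0 n 1).map
        (fun i => (b + i * (w + s), b + i * (w + s) + w)),
       b + (n : Int) * (w + s)) := by
  induction n with
  | zero => simp
  | succ n ih =>
    have hn : (0 : Int) ≤ (n : Int) := Int.natCast_nonneg n
    rw [show ((n + 1 : Nat) : Int) = (n : Int) + 1 by push_cast; ring,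
       PySem.List.pyRange_one_succ_right hn, List.foldl_append, ih, List.map_append]
    simp only [List.foldl_cons, List.foldl_nil, List.map_cons, List.map_nil]
    simp only [Prod.mk.injEq]
    exact ⟨trivial, by ring⟩

theorem calculate_character_positions_spec : Claim_equal_calculate_character_positions := by
  intro b w s c _
  show calculate_character_positions b w s c = calculate_character_positions_alt b w s c
  unfold calculate_character_positions calculate_character_positions_alt
  by_cases hc : c ≤ 0
  · rw [PySem.List.pyRange_one_eq_nil hc]; rfl
  · rw [not_le] at hc
    obtain ⟨n, rfl⟩ : ∃ n : Nat, c = (n : Int) :=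
      ⟨c.toNat, (Int.toNat_of_nonneg (le_of_lt hc)).symm⟩
    simpa using congrArg Prod.fst (ccp_fold_invariant b w s n)
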